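-- pv_equiv track=rewrite | github.com/cindyc-dev/doxide | examples/cardgamebot.py | acc_valid
-- ===== SOURCE A (Python) =====
-- ACC_TOTALS = [34, 55, 68, 76, 81, 84, 86, 87, 88]
--
-- def acc_valid(val_list, acc_total=0, acc_list=ACC_TOTALS):
--     '''
--     Return True if accumulation is complete; False if it surpassed the next
--     accumulation goal (invalid); None if it is not complete yet. [Recursive]
--     Arguments:
--         val_list(list): list of card's values ['2', 'A', ...]
--     Local Variables:
--         acc_total(int): current accumulation total
--         acc_list(list):
--     Returns:
--         bool:
--             -- True if accumulation is complete
--             -- False if next accumulation goal surpassed (invalid)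
--             -- None if accumulation is not complete yet
--     '''
--     # BASE: acc goal surpassed or maximum acc surpassed - invalid
--     if not acc_list or acc_total > acc_list[0]:
--         return False
--
--     # BASE: group completed and goal total reached - complete
--     elif not val_list and acc_total == acc_list[0]:
--         return True
--
--     # BASE: group completed but goal not yet reached - incomplete
--     elif not val_list and acc_total < acc_list[0]:
--         return None
--
--     # acc goal reached - move on to next goal
--     elif acc_total == acc_list[0]:
--         return acc_valid(val_list[1:], acc_total + val_list[0], acc_list[1:])
--
--     # acc goal not yet reached - continue working towards current goal
--     elif acc_total < acc_list[0]:
--         return acc_valid(val_list[1:], acc_total + val_list[0], acc_list)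
-- ===== SOURCE B (Python) =====
-- ACC_TOTALS = [34, 55, 68, 76, 81, 84, 86, 87, 88]
--
-- def acc_valid(val_list, acc_total=0, acc_list=ACC_TOTALS):
--     """Iterative version: index pointer into acc_list and a running total
--     instead of recursion with list slicing."""
--     i = 0
--     n = len(acc_list)
--     total = acc_total
--     for v in val_list:
--         if i == n or total > acc_list[i]:
--             return False
--         if total == acc_list[i]:
--             i += 1
--         total += v
--     if i == n or total > acc_list[i]:
--         return False
--     if total == acc_list[i]:
--         return True
--     return None
-- ===== Notes on version B (the rewrite author's own statement) =====
-- stated objective: alternative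
-- what changed: Replaced the recursion that slices both val_list and acc_list at every step with a single iterative pass keeping an index pointer into acc_list and a running total; avoids the slicing but was not measurably faster on the generated inputs.
import Mathlib
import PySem

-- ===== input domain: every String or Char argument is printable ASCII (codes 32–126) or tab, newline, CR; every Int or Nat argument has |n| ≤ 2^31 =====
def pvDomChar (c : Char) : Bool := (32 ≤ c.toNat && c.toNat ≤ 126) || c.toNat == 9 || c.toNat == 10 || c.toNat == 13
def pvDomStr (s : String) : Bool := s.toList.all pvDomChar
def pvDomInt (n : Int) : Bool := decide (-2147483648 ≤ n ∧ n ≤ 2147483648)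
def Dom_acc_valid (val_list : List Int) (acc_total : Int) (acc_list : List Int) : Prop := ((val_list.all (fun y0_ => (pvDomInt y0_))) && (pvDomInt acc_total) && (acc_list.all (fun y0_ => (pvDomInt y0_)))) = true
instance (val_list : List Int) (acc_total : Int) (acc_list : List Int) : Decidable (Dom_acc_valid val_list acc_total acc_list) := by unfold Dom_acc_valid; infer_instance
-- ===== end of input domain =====

-- B replaces A's slicing recursion with one iterative pass (index pointer + running total): an alternative, slice-free formulation.


-- ===== PORT A =====
-- literal transliteration of A's recursion (branches in A's order; slices become tail/cons)
def acc_valid (val_list : List Int) (acc_total : Int) (acc_list : List Int) : Option Bool :=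
  match acc_list with
  | [] => some false                                  -- not acc_list → False
  | a :: rest =>
    if acc_total > a then some false                  -- acc_total > acc_list[0] → False
    else
      match val_list with
      | [] =>
        if acc_total = a then some true               -- group done, goal reached
        else none                                     -- group done, goal not reached
      | v :: vs =>
        if acc_total = a then
          acc_valid vs (acc_total + v) rest           -- move on to next goal
        else
          acc_valid vs (acc_total + v) (a :: rest)    -- keep working towards current goal
termination_by val_list.length

-- ===== PORT B =====
-- B's final check after the loop over val_list ends
def accFinish (i : Nat) (total : Int) (acc_list : List Int) : Option Bool :=
  if i = acc_list.length ∨ total > acc_list.getD i 0 then some false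
  else if total = acc_list.getD i 0 then some true
  else none

-- B's for-loop over val_list with state (i, total); early return = stopping the recursion
def accLoop (vs : List Int) (i : Nat) (total : Int) (acc_list : List Int) : Option Bool :=
  match vs with
  | [] => accFinish i total acc_list
  | v :: rest =>
    if i = acc_list.length ∨ total > acc_list.getD i 0 then some false
    else accLoop rest (if total = acc_list.getD i 0 then i + 1 else i) (total + v) acc_list

def acc_valid_alt (val_list : List Int) (acc_total : Int) (acc_list : List Int) : Option Bool :=
  accLoop val_list 0 acc_total acc_list

-- ===== PRECONDITION & SPEC =====
def Spec_acc_valid (val_list : List Int) (acc_total : Int) (acc_list : List Int) (out : Option Bool) : Prop := out = acc_valid_alt val_list acc_total acc_list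
instance (val_list : List Int) (acc_total : Int) (acc_list : List Int) (out : Option Bool) : Decidable (Spec_acc_valid val_list acc_total acc_list out) := by unfold Spec_acc_valid; infer_instance

-- ===== CLAIM (what is proved, stated in full; the proofs are below) =====
def Claim_equal_acc_valid : Prop := ∀ (val_list : List Int) (acc_total : Int) (acc_list : List Int), Dom_acc_valid val_list acc_total acc_list → Spec_acc_valid val_list acc_total acc_list (acc_valid val_list acc_total acc_list)

-- ===== LEMMAS AND PROOFS =====

-- The loop at index i computes A's recursion on the suffix acc_list.drop i.
theorem accLoop_eq_drop (vs : List Int) (i : Nat) (total : Int) (L : List Int)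
    (hi : i ≤ L.length) :
    accLoop vs i total L = acc_valid vs total (L.drop i) := by
  induction vs generalizing i total with
  | nil =>
    by_cases h : i = L.length
    · simp [accLoop, accFinish, acc_valid, h]
    · have hlt : i < L.length := lt_of_le_of_ne hi h
      rw [List.drop_eq_getElem_cons hlt]
      simp only [accLoop, accFinish, acc_valid, List.getD_eq_getElem L 0 hlt, h, false_or]
  | cons v rest ih =>
    by_cases h : i = L.length
    · simp [accLoop, acc_valid, h]
    · have hlt : i < L.length := lt_of_le_of_ne hi h
      rw [List.drop_eq_getElem_cons hlt]
      simp only [accLoop, acc_valid, List.getD_eq_getElem L 0 hlt, h, false_or]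
      by_cases hgt : total > L[i]
      · simp [hgt]
      · simp only [hgt, if_false]
        by_cases heq : total = L[i]
        · simp only [heq, if_true]
          exact ih (i + 1) _ hlt
        · simp only [heq, if_false]
          rw [ih i (total + v) hi, List.drop_eq_getElem_cons hlt]

-- ===== VERDICT (by name: the statement is the Claim_ definition above) =====
theorem acc_valid_spec : Claim_equal_acc_valid := by
  intro val_list acc_total acc_list _
  unfold Spec_acc_valid acc_valid_alt
  rw [accLoop_eq_drop val_list 0 acc_total acc_list (Nat.zero_le _), List.drop_zero]
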